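-- pv_equiv track=rewrite | github.com/fastattackv/APY-launcher | Source code/App/APY! Launcher.py | insert_in_dict
-- ===== SOURCE A (Python) =====
-- def insert_in_dict(dict_to_insert: dict, index: int, item: tuple) -> dict:
--     """Inserts the given element at the given index in the given dict
--
--     :param dict_to_insert: dict to insert the item
--     :param index: index to insert the item at
--     :param item: item to insert
--     :return: dict with the inserted item
--     """
--     if index > len(dict_to_insert):
--         raise ValueError(f"The given index is out of range: {index}")
--     elif index == len(dict_to_insert):
--         temp_dict = dict_to_insert.copy()
--         temp_dict[item[0]] = item[1]
--         return temp_dict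
--     else:
--         temp_dict = {}
--         x = 0
--         for a in dict_to_insert.items():
--             if x == index:
--                 temp_dict[item[0]] = item[1]
--             temp_dict[a[0]] = a[1]
--             x += 1
--         return temp_dict
-- ===== SOURCE B (Python) =====
-- def insert_in_dict(dict_to_insert: dict, index: int, item: tuple) -> dict:
--     """Inserts the given element at the given index in the given dict (list-based rebuild)."""
--     if index > len(dict_to_insert):
--         raise ValueError(f"The given index is out of range: {index}")
--     items = list(dict_to_insert.items())
--     if index >= 0:
--         # A inserts nothing for a negative index and just returns a copy; keep that behaviour.
--         items.insert(index, item)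
--     return dict(items)
-- ===== Notes on version B (the rewrite author's own statement) =====
-- stated objective: simpler
-- what changed: Replaces A's hand-rolled counter loop that rebuilds the dict pair by pair with a list-level rebuild: take the items list, list.insert the pair at the index (only for non-negative indices, matching A's copy-only behaviour there), and convert back with dict(); the append (index == len) and middle-insert cases collapse into one path.
-- outside the precondition, e.g. on insert_in_dict({'a': '1'}, 3, ('b', '2')): A raises ValueError, B raises ValueError
import Mathlib
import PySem

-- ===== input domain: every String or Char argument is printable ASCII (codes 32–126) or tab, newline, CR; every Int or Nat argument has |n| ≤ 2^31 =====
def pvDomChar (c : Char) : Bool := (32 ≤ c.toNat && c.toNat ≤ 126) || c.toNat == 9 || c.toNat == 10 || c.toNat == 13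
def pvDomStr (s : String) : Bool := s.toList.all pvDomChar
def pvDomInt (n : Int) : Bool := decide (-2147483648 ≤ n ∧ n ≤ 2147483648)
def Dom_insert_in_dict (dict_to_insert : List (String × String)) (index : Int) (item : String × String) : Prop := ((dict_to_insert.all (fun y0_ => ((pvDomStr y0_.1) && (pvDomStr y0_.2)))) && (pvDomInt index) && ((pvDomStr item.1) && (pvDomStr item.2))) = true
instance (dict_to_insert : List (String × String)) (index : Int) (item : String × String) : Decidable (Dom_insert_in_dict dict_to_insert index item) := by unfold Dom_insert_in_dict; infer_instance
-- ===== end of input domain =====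

-- B rebuilds the result with list.insert on the items list instead of A's hand-rolled counter loop
-- (same values everywhere, including A's copy-only behaviour on negative indices); objective: simpler.

-- ===== PORT A =====
-- A's else-branch loop: x counts positions; when x == index the item is written first, then the current pair.
def insertLoopA (index : Int) (item : String × String) :
    List (String × String) → PySem.Dict String String → Int → PySem.Dict String String
  | [], temp, _ => temp
  | a :: rest, temp, x =>
      insertLoopA index item rest
        ((if x = index then temp.insert item.1 item.2 else temp).insert a.1 a.2) (x + 1)

def insert_in_dict (dict_to_insert : List (String × String)) (index : Int) (item : String × String) : List (String × String) :=
  let d := PySem.Dict.ofList dict_to_insert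
  if index > (d.size : Int) then []           -- Python raises ValueError here (excluded by Pre_)
  else if index = (d.size : Int) then ((d.insert item.1 item.2)).items
  else (insertLoopA index item d.items PySem.Dict.empty 0).items

-- ===== PORT B =====
def insert_in_dict_alt (dict_to_insert : List (String × String)) (index : Int) (item : String × String) : List (String × String) :=
  let d := PySem.Dict.ofList dict_to_insert
  if index > (d.size : Int) then []           -- Python raises ValueError here (excluded by Pre_)
  else
    let items := d.items
    let items2 := if 0 ≤ index then PySem.List.insert items index item else items
    (PySem.Dict.ofList items2).items

-- ===== PRECONDITION & SPEC =====
-- Pre_ excludes exactly the inputs where both Pythons raise ValueError: index greater than the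
-- number of distinct keys of the dict.
def Pre_insert_in_dict (dict_to_insert : List (String × String)) (index : Int) (item : String × String) : Prop :=
  index ≤ ((PySem.List.dedup (dict_to_insert.map Prod.fst)).length : Int)
instance (dict_to_insert : List (String × String)) (index : Int) (item : String × String) : Decidable (Pre_insert_in_dict dict_to_insert index item) := by unfold Pre_insert_in_dict; infer_instance

def pvWitness_insert_in_dict : (List (String × String)) × Int × (String × String) :=
  ([("a", "1")], 1, ("b", "2"))

def Spec_insert_in_dict (dict_to_insert : List (String × String)) (index : Int) (item : String × String) (out : List (String × String)) : Prop := out = insert_in_dict_alt dict_to_insert index item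
instance (dict_to_insert : List (String × String)) (index : Int) (item : String × String) (out : List (String × String)) : Decidable (Spec_insert_in_dict dict_to_insert index item out) := by unfold Spec_insert_in_dict; infer_instance

-- ===== CLAIM (what is proved, stated in full; the proofs are below) =====
def Claim_equal_insert_in_dict : Prop := ∀ (dict_to_insert : List (String × String)) (index : Int) (item : String × String), Dom_insert_in_dict dict_to_insert index item → Pre_insert_in_dict dict_to_insert index item → Spec_insert_in_dict dict_to_insert index item (insert_in_dict dict_to_insert index item)

-- ===== LEMMAS AND PROOFS =====

-- Folding Dict.insert over a list whose keys are distinct rebuilds the dict: dict(d.items()) = d.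
theorem pvRebuild (d : PySem.Dict String String) (h : d.keys.Nodup) :
    d.items.foldl (fun e a => e.insert a.1 a.2) PySem.Dict.empty = d := by
  have h2 : (d.items.map Prod.fst).Nodup := h
  apply PySem.Dict.ext
  rw [PySem.Dict.items_foldl_insert_fresh d.items Prod.fst Prod.snd PySem.Dict.empty
      (fun a _ => by simp) h2]
  simp [PySem.Dict.empty]

-- Past the insertion point (index < x) A's loop is a plain rebuild fold.
theorem pvLoopA_no_trigger (index : Int) (item : String × String) :
    ∀ (rest : List (String × String)) (temp : PySem.Dict String String) (x : Int),
      index < x →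
      insertLoopA index item rest temp x = rest.foldl (fun e a => e.insert a.1 a.2) temp := by
  intro rest
  induction rest with
  | nil => intro temp x _; rfl
  | cons a t ih =>
      intro temp x hx
      simp only [insertLoopA, List.foldl_cons]
      rw [if_neg (by omega)]
      exact ih _ (x + 1) (by omega)

-- With p positions left before the insertion point, A's loop is the fold over the list with the
-- item inserted at position p.
theorem pvLoopA_eq (index : Int) (item : String × String) :
    ∀ (rest : List (String × String)) (temp : PySem.Dict String String) (p : Nat) (x : Int),
      x + (p : Int) = index → p < rest.length →
      insertLoopA index item rest temp x
        = (rest.take p ++ item :: rest.drop p).foldl (fun e a => e.insert a.1 a.2) temp := by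
  intro rest
  induction rest with
  | nil => intro temp p x _ hp; simp at hp
  | cons a t ih =>
      intro temp p x hpx hp
      cases p with
      | zero =>
          simp only [insertLoopA, List.take_zero, List.drop_zero, List.nil_append, List.foldl_cons]
          rw [if_pos (by omega)]
          exact pvLoopA_no_trigger index item t _ (x + 1) (by omega)
      | succ q =>
          simp only [insertLoopA, List.take_succ_cons, List.drop_succ_cons, List.cons_append,
            List.foldl_cons]
          rw [if_neg (by omega)]
          exact ih _ q (x + 1) (by omega) (by simpa using hp)

-- The size of dict(l) is the number of distinct keys of l.
theorem pvSize_ofList (l : List (String × String)) :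
    (PySem.Dict.ofList l).size = (PySem.List.dedup (l.map Prod.fst)).length := by
  have hk : (PySem.Dict.ofList l).keys = PySem.Set.ofList (l.map Prod.fst) := by
    show (l.foldl (fun d a => d.insert a.1 a.2) PySem.Dict.empty).keys = _
    rw [PySem.Dict.keys_foldl_insert_key (key := Prod.fst) (f := fun _ a => a.2)]
    simp [PySem.Set.update_nil_left]
  have hlen : (PySem.Dict.ofList l).size = (PySem.Dict.ofList l).keys.length := by
    show (PySem.Dict.ofList l).items.length = ((PySem.Dict.ofList l).items.map Prod.fst).length
    simp
  rw [hlen, hk]; simp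

-- ===== VERDICT (by name: the statement is the Claim_ definition above) =====
theorem insert_in_dict_spec : Claim_equal_insert_in_dict := by
  intro l index item _ hpre
  unfold Spec_insert_in_dict insert_in_dict insert_in_dict_alt
  simp only []
  set d := PySem.Dict.ofList l with hd
  have hnd : d.keys.Nodup := PySem.Dict.nodup_keys_ofList l
  have hsize : (d.size : Int) = ((PySem.List.dedup (l.map Prod.fst)).length : Int) := by
    rw [hd]; exact_mod_cast pvSize_ofList l
  have hle : index ≤ (d.size : Int) := by rw [hsize]; exact hpre
  split_ifs with h1 h2 h3 h3
  · rfl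
  · -- append case: index == len(dict)
    have hlen : index = (PySem.List.len d.items : Int) := by
      simpa [PySem.List.len] using h2
    rw [hlen, PySem.List.insert_len]
    show _ = ((d.items ++ [item]).foldl (fun e a => e.insert a.1 a.2) PySem.Dict.empty).items
    rw [List.foldl_append, pvRebuild d hnd]
    rfl
  · exact absurd h2 (by omega)
  · -- middle insert: 0 ≤ index < len(dict)
    have hplt : index.toNat < d.items.length := by
      have : (d.size : Int) = (d.items.length : Int) := by rfl
      omega
    have hcast : ((index.toNat : Nat) : Int) = index := by omega
    rw [pvLoopA_eq index item d.items PySem.Dict.empty index.toNat 0 (by omega) hplt]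
    rw [← hcast, PySem.List.insert_natCast d.items index.toNat item (by omega)]
    rfl
  · -- negative index: A's loop never fires; B inserts nothing — both return a copy
    rw [pvLoopA_no_trigger index item d.items PySem.Dict.empty 0 (by omega)]
    rfl
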